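-- pv_equiv track=rewrite | github.com/lancelafontaine/coding-challenges | daily-programmer/daily-programmer-easy-026/python3/daily-programmer-easy-26.py | removeConsecutiveChars
-- ===== SOURCE A (Python) =====
-- def removeConsecutiveChars(initStr):
--     previousChar  = ''
--     newStr = ''
--     extraChars = ''
--     for char in initStr:
--         if previousChar == char:
--             extraChars  = extraChars + char
--         else:
--             newStr = newStr + char
--         previousChar = char
--     return [newStr, extraChars]
-- ===== SOURCE B (Python) =====
-- import itertools
--
-- def removeConsecutiveChars(initStr):
--     newStr = ''
--     extraChars = ''
--     for char, group in itertools.groupby(initStr):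
--         k = sum(1 for _ in group)
--         newStr += char
--         extraChars += char * (k - 1)
--     return [newStr, extraChars]
-- ===== Notes on version B (the rewrite author's own statement) =====
-- stated objective: idiomatic
-- what changed: Replaces the pairwise previous-char comparison loop with an itertools.groupby traversal over maximal runs, appending each run's head once and char*(len-1) to the extras.
import Mathlib
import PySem

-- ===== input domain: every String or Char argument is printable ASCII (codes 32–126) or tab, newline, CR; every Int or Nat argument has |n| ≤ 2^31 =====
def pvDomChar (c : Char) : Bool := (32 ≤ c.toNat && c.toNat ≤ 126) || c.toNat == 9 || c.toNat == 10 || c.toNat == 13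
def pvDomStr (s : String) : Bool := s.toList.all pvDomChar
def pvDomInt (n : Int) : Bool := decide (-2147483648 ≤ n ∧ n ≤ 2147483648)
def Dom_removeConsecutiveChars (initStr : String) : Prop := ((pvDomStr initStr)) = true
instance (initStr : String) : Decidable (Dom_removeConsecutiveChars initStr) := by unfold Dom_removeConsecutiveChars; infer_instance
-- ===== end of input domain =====

-- B replaces A's pairwise previous-char loop with a groupby-style traversal over
-- maximal runs of equal characters (objective: idiomatic); same return value, proved equal.

-- ===== PORT A =====
-- A's loop over the characters of initStr; previousChar is the Python string '' or a
-- one-character string, modelled as a List Char ([] initially, [c] afterwards).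
def pvLoopA (prev : List Char) : List Char → List Char → List Char → List Char × List Char
  | [], n, e => (n, e)
  | c :: cs, n, e =>
    if prev == [c] then pvLoopA [c] cs n (e ++ [c])
    else pvLoopA [c] cs (n ++ [c]) e

def removeConsecutiveChars (initStr : String) : List String :=
  let p := pvLoopA [] initStr.toList [] []
  [String.ofList p.1, String.ofList p.2]

-- ===== PORT B =====
-- groupby's next maximal run of c: pvTakeRun c cs = (number of further copies of c at
-- the front of cs, the rest of the input).
def pvTakeRun (c : Char) : List Char → Nat × List Char
  | [] => (0, [])
  | d :: ds =>
    if d == c then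
      let p := pvTakeRun c ds
      (p.1 + 1, p.2)
    else (0, d :: ds)

theorem pvTakeRun_length (c : Char) (cs : List Char) : (pvTakeRun c cs).2.length ≤ cs.length := by
  induction cs with
  | nil => simp [pvTakeRun]
  | cons d ds ih =>
    simp only [pvTakeRun]
    split
    · exact Nat.le_trans ih (Nat.le_succ _)
    · simp

-- B's for-loop over groupby(initStr): one recursive step per maximal run; the run's
-- head char goes to newStr, its remaining k copies (char * (k - 1) in Source B) to extraChars.
def pvGroups (c : Char) (cs : List Char) : List Char × List Char :=
  let p := pvTakeRun c cs
  match h : p.2 with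
  | [] => ([c], List.replicate p.1 c)
  | d :: r' =>
    let q := pvGroups d r'
    (c :: q.1, List.replicate p.1 c ++ q.2)
termination_by cs.length
decreasing_by
  have := pvTakeRun_length c cs
  rw [h] at this
  simp at this
  omega

def removeConsecutiveChars_alt (initStr : String) : List String :=
  match initStr.toList with
  | [] => ["", ""]
  | c :: cs =>
    let p := pvGroups c cs
    [String.ofList p.1, String.ofList p.2]

-- ===== PRECONDITION & SPEC =====
def Spec_removeConsecutiveChars (initStr : String) (out : List String) : Prop := out = removeConsecutiveChars_alt initStr
instance (initStr : String) (out : List String) : Decidable (Spec_removeConsecutiveChars initStr out) := by unfold Spec_removeConsecutiveChars; infer_instance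

-- ===== CLAIM (what is proved, stated in full; the proofs are below) =====
def Claim_equal_removeConsecutiveChars : Prop := ∀ (initStr : String), Dom_removeConsecutiveChars initStr → Spec_removeConsecutiveChars initStr (removeConsecutiveChars initStr)

-- ===== LEMMAS AND PROOFS =====

-- Running A's loop with previous char c over cs when cs is one run of c:
-- the whole run goes to extraChars.
theorem pvLoopA_run_nil (cs : List Char) : ∀ (c : Char) (n e : List Char),
    (pvTakeRun c cs).2 = [] →
    pvLoopA [c] cs n e = (n, e ++ List.replicate (pvTakeRun c cs).1 c) := by
  induction cs with
  | nil => intro c n e _; simp [pvLoopA, pvTakeRun]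
  | cons d ds ih =>
    intro c n e h
    by_cases hdc : d = c
    · subst hdc
      have htr : pvTakeRun d (d :: ds) = ((pvTakeRun d ds).1 + 1, (pvTakeRun d ds).2) := by
        simp [pvTakeRun]
      rw [htr] at h ⊢
      have hstep : pvLoopA [d] (d :: ds) n e = pvLoopA [d] ds n (e ++ [d]) := by
        simp [pvLoopA]
      rw [hstep, ih d n (e ++ [d]) h]
      simp [List.replicate_succ, List.append_assoc]
    · have htr : pvTakeRun c (d :: ds) = (0, d :: ds) := by
        simp [pvTakeRun, hdc]
      rw [htr] at h
      exact absurd h (by simp)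

-- Running A's loop with previous char c over cs when a different char d follows the
-- leading run of c: the run goes to extraChars, d to newStr, and the loop continues.
theorem pvLoopA_run_cons (cs : List Char) : ∀ (c d : Char) (r' n e : List Char),
    (pvTakeRun c cs).2 = d :: r' →
    pvLoopA [c] cs n e = pvLoopA [d] r' (n ++ [d]) (e ++ List.replicate (pvTakeRun c cs).1 c) := by
  induction cs with
  | nil => intro c d r' n e h; simp [pvTakeRun] at h
  | cons x xs ih =>
    intro c d r' n e h
    by_cases hxc : x = c
    · subst hxc
      have htr : pvTakeRun x (x :: xs) = ((pvTakeRun x xs).1 + 1, (pvTakeRun x xs).2) := by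
        simp [pvTakeRun]
      rw [htr] at h ⊢
      have hstep : pvLoopA [x] (x :: xs) n e = pvLoopA [x] xs n (e ++ [x]) := by
        simp [pvLoopA]
      rw [hstep, ih x d r' n (e ++ [x]) h]
      simp [List.replicate_succ, List.append_assoc]
    · have htr : pvTakeRun c (x :: xs) = (0, x :: xs) := by
        simp [pvTakeRun, hxc]
      rw [htr] at h ⊢
      obtain ⟨h1, h2⟩ : x = d ∧ xs = r' := by simpa using h
      subst h1; subst h2
      have hstep : pvLoopA [c] (x :: xs) n e = pvLoopA [x] xs (n ++ [x]) e := by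
        simp only [pvLoopA]
        rw [if_neg]
        simp
        intro hcd
        exact hxc hcd.symm
      rw [hstep]
      simp

-- Unfolding equations for pvGroups, phrased on a hypothesis about the leading run.
theorem pvGroups_eq_nil (c : Char) (cs : List Char) (h : (pvTakeRun c cs).2 = []) :
    pvGroups c cs = ([c], List.replicate (pvTakeRun c cs).1 c) := by
  rw [pvGroups]
  split
  · rfl
  · rename_i d r' heq
    rw [h] at heq
    exact absurd heq (by simp)

theorem pvGroups_eq_cons (c : Char) (cs : List Char) (d : Char) (r' : List Char)
    (h : (pvTakeRun c cs).2 = d :: r') :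
    pvGroups c cs = (c :: (pvGroups d r').1, List.replicate (pvTakeRun c cs).1 c ++ (pvGroups d r').2) := by
  rw [pvGroups]
  split
  · rename_i heq
    rw [h] at heq
    exact absurd heq (by simp)
  · rename_i d2 r2 heq
    rw [h] at heq
    obtain ⟨h1, h2⟩ : d = d2 ∧ r' = r2 := by simpa using heq
    subst h1; subst h2
    rfl

-- A's loop from state (n ++ [c], e) computes B's run-grouped pair appended to (n, e).
theorem pvLoopA_eq_groups : ∀ (m : Nat) (cs : List Char), cs.length ≤ m → ∀ (c : Char) (n e : List Char),
    pvLoopA [c] cs (n ++ [c]) e = (n ++ (pvGroups c cs).1, e ++ (pvGroups c cs).2) := by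
  intro m
  induction m with
  | zero =>
    intro cs hm c n e
    have : cs = [] := List.eq_nil_of_length_eq_zero (Nat.le_zero.mp hm)
    subst this
    simp [pvLoopA, pvGroups, pvTakeRun]
  | succ m ih =>
    intro cs hm c n e
    cases hrest : (pvTakeRun c cs).2 with
    | nil =>
      rw [pvLoopA_run_nil cs c (n ++ [c]) e hrest, pvGroups_eq_nil c cs hrest]
    | cons d r' =>
      rw [pvLoopA_run_cons cs c d r' (n ++ [c]) e hrest]
      have hlen : r'.length ≤ m := by
        have := pvTakeRun_length c cs
        rw [hrest] at this
        simp at this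
        omega
      rw [ih r' hlen d (n ++ [c]) (e ++ List.replicate (pvTakeRun c cs).1 c)]
      rw [pvGroups_eq_cons c cs d r' hrest]
      simp [List.append_assoc]

-- ===== VERDICT (by name: the statement is the Claim_ definition above) =====
theorem removeConsecutiveChars_spec : Claim_equal_removeConsecutiveChars := by
  intro s _
  unfold Spec_removeConsecutiveChars removeConsecutiveChars removeConsecutiveChars_alt
  cases hl : s.toList with
  | nil => simp [pvLoopA]
  | cons c cs =>
    have hfirst : pvLoopA [] (c :: cs) [] [] = pvLoopA [c] cs ([] ++ [c]) [] := by
      simp [pvLoopA]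
    simp only [hfirst, pvLoopA_eq_groups cs.length cs (Nat.le_refl _) c [] []]
    simp
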